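-- pv_equiv track=rewrite | github.com/alfredoVallejoM/lattice-weaver | lattice_weaver/topology/fca_cliques.py | _filter_maximal
-- ===== SOURCE A (Python) =====
-- from typing import List, Set, Tuple, Dict
--
-- def _filter_maximal(cliques: List[Set]) -> List[Set]:
--     """
--     Filtra solo los cliques maximales.
--
--     Un clique es maximal si no está contenido en ningún otro clique.
--
--     Args:
--         cliques: Lista de todos los cliques
--
--     Returns:
--         Lista de cliques maximales
--     """
--     if not cliques:
--         return []
--
--     # Ordenar por tamaño descendente para optimizar
--     cliques_sorted = sorted(cliques, key=len, reverse=True)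
--
--     maximal = []
--
--     for clique in cliques_sorted:
--         is_maximal = True
--
--         # Verificar si está contenido en algún clique ya marcado como maximal
--         for maximal_clique in maximal:
--             if clique.issubset(maximal_clique) and clique != maximal_clique:
--                 is_maximal = False
--                 break
--
--         if is_maximal:
--             maximal.append(clique)
--
--     return maximal
-- ===== SOURCE B (Python) =====
-- from typing import List, Set
--
--
-- def _filter_maximal(cliques: List[Set]) -> List[Set]:
--     # A clique fails to be maximal exactly when a STRICTLY LARGER clique contains it
--     # (an equal-size superset of a set is the set itself), so test each clique
--     # against the whole sorted list with a size-based strict-superset predicate;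
--     # no accumulator of already-kept maximals is maintained.
--     order = sorted(cliques, key=len, reverse=True)
--     result = []
--     for c in order:
--         dominated = False
--         for d in order:
--             if len(c) < len(d) and c.issubset(d):
--                 dominated = True
--                 break
--         if not dominated:
--             result.append(c)
--     return result
-- ===== Notes on version B (the rewrite author's own statement) =====
-- stated objective: alternative
-- what changed: Drops A's growing 'maximal' accumulator and its subset-and-not-equal test: B tests every clique against the whole sorted list with a strict-size superset predicate (len(c) < len(d) and c.issubset(d)), correct because an equal-size superset of a set is the set itself.
import Mathlib
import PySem

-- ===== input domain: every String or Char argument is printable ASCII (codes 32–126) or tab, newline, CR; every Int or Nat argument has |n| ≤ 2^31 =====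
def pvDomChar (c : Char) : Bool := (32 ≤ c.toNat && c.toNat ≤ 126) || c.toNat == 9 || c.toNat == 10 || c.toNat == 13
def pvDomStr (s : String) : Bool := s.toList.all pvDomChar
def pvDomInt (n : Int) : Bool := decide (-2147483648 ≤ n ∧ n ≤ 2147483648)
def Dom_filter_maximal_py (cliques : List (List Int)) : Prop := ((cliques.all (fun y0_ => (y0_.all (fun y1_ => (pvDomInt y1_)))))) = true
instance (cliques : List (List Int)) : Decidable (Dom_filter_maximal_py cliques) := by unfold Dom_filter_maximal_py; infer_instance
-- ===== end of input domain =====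

-- B drops A's growing `maximal` accumulator and its subset-and-not-equal test: each clique is
-- tested against the whole sorted list with a strict-size superset predicate; objective: alternative.

-- ===== PORT A =====
def filter_maximal_py (cliques : List (List Int)) : List (List Int) :=
  if cliques = [] then []
  else
    let cliques_sorted := PySem.List.sorted cliques (fun c => c.length) true
    cliques_sorted.foldl
      (fun maximal clique =>
        -- inner loop with break: some kept maximal properly contains `clique`
        if maximal.any (fun m => PySem.Set.issubset clique m && !(PySem.Set.equal clique m)) then
          maximal
        else
          maximal ++ [clique])
      []

-- ===== PORT B =====
-- inner `for d in order: … break` loop of Source B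
def pvStrictSup (c : List Int) : List (List Int) → Bool
  | [] => false
  | d :: ds =>
      if decide (c.length < d.length) && PySem.Set.issubset c d then true
      else pvStrictSup c ds

-- outer `for c in order: … result.append(c)` loop of Source B, building the result structurally
def pvCollect (order : List (List Int)) : List (List Int) → List (List Int)
  | [] => []
  | c :: cs =>
      if pvStrictSup c order then pvCollect order cs
      else c :: pvCollect order cs

def filter_maximal_py_alt (cliques : List (List Int)) : List (List Int) :=
  let order := PySem.List.sorted cliques (fun c => c.length) true
  pvCollect order order

-- ===== PRECONDITION & SPEC =====
-- Each clique is a Python set, so its List Int encoding holds distinct elements; Pre_ states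
-- exactly that and excludes no input the Python function can receive.
def Pre_filter_maximal_py (cliques : List (List Int)) : Prop := ∀ c ∈ cliques, c.Nodup
instance (cliques : List (List Int)) : Decidable (Pre_filter_maximal_py cliques) := by
  unfold Pre_filter_maximal_py; infer_instance
def pvWitness_filter_maximal_py : List (List Int) := [[1], [1, 2], [3]]

def Spec_filter_maximal_py (cliques : List (List Int)) (out : List (List Int)) : Prop := out = filter_maximal_py_alt cliques
instance (cliques : List (List Int)) (out : List (List Int)) : Decidable (Spec_filter_maximal_py cliques out) := by unfold Spec_filter_maximal_py; infer_instance

-- ===== CLAIM (what is proved, stated in full; the proofs are below) =====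
def Claim_equal_filter_maximal_py : Prop := ∀ (cliques : List (List Int)), Dom_filter_maximal_py cliques → Pre_filter_maximal_py cliques → Spec_filter_maximal_py cliques (filter_maximal_py cliques)

-- ===== LEMMAS AND PROOFS =====

-- the proper-superset test A uses
def pvG (c d : List Int) : Bool := PySem.Set.issubset c d && !(PySem.Set.equal c d)

theorem pvG_def (c d : List Int) :
    (PySem.Set.issubset c d && !(PySem.Set.equal c d)) = pvG c d := rfl

theorem pvG_self (c : List Int) : pvG c c = false := by
  have h : PySem.Set.equal c c = true := (PySem.Set.equal_iff c c).mpr (fun x => Iff.rfl)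
  simp [pvG, h]

theorem pvG_parts {c d : List Int} (h : pvG c d = true) :
    PySem.Set.issubset c d = true ∧ PySem.Set.equal c d = false := by
  simp only [pvG, Bool.and_eq_true, Bool.not_eq_true'] at h
  exact h

theorem pvG_length_lt {c d : List Int} (hc : c.Nodup) (h : pvG c d = true) :
    c.length < d.length := by
  obtain ⟨h1, h2⟩ := pvG_parts h
  have hsub : ∀ x ∈ c, x ∈ d := (PySem.Set.issubset_iff c d).mp h1
  have hne : ¬ (∀ x, x ∈ c ↔ x ∈ d) := by
    intro hall
    have := (PySem.Set.equal_iff c d).mpr hall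
    rw [h2] at this
    exact Bool.false_ne_true this
  have hfs : c.toFinset ⊂ d.toFinset := by
    constructor
    · intro x hx
      simp only [List.mem_toFinset] at *
      exact hsub x hx
    · intro hrev
      apply hne
      intro x
      refine ⟨hsub x, fun hx => ?_⟩
      exact List.mem_toFinset.mp (hrev (List.mem_toFinset.mpr hx))
  calc c.length = c.toFinset.card := (List.toFinset_card_of_nodup hc).symm
    _ < d.toFinset.card := Finset.card_lt_card hfs
    _ ≤ d.length := List.toFinset_card_le d

theorem pvG_trans {c d m : List Int} (hc : c.Nodup) (hd : d.Nodup) (hm : m.Nodup)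
    (h1 : pvG c d = true) (h2 : pvG d m = true) : pvG c m = true := by
  have hs1 := (PySem.Set.issubset_iff c d).mp (pvG_parts h1).1
  have hs2 := (PySem.Set.issubset_iff d m).mp (pvG_parts h2).1
  have hlen : c.length < m.length :=
    lt_trans (pvG_length_lt hc h1) (pvG_length_lt hd h2)
  have hsub : PySem.Set.issubset c m = true :=
    (PySem.Set.issubset_iff c m).mpr (fun x hx => hs2 x (hs1 x hx))
  have heq : PySem.Set.equal c m = false := by
    cases heq : PySem.Set.equal c m with
    | false => rfl
    | true =>
      exfalso
      have hall := (PySem.Set.equal_iff c m).mp heq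
      have hmc : ∀ x ∈ m, x ∈ c := fun x hx => (hall x).mpr hx
      have : m.length ≤ c.length := by
        calc m.length = m.toFinset.card := (List.toFinset_card_of_nodup hm).symm
          _ ≤ c.toFinset.card := Finset.card_le_card (by
                intro x hx
                exact List.mem_toFinset.mpr (hmc x (List.mem_toFinset.mp hx)))
          _ ≤ c.length := List.toFinset_card_le c
      omega
  simp [pvG, hsub, heq]

-- under nodup of both sides, A's subset-and-not-equal test IS B's strict-size superset test
theorem pvG_eq_strict {c d : List Int} (hc : c.Nodup) (hd : d.Nodup) :
    pvG c d = (decide (c.length < d.length) && PySem.Set.issubset c d) := by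
  cases hG : pvG c d with
  | true =>
    obtain ⟨h1, _⟩ := pvG_parts hG
    have := pvG_length_lt hc hG
    simp [h1, this]
  | false =>
    cases hsub : PySem.Set.issubset c d with
    | false => rw [Bool.and_false]
    | true =>
      have heq : PySem.Set.equal c d = true := by
        cases heq : PySem.Set.equal c d with
        | true => rfl
        | false => exfalso; rw [show pvG c d = true by simp [pvG, hsub, heq]] at hG; exact Bool.noConfusion hG
      have hall := (PySem.Set.equal_iff c d).mp heq
      have hlen : d.length ≤ c.length := by
        calc d.length = d.toFinset.card := (List.toFinset_card_of_nodup hd).symm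
          _ ≤ c.toFinset.card := Finset.card_le_card (by
                intro x hx
                exact List.mem_toFinset.mpr ((hall x).mpr (List.mem_toFinset.mp hx)))
          _ ≤ c.length := List.toFinset_card_le c
      rw [Bool.and_true, decide_eq_false (by omega : ¬ c.length < d.length)]

theorem pvStrictSup_eq_any (c : List Int) (s : List (List Int)) :
    pvStrictSup c s = s.any (fun d => decide (c.length < d.length) && PySem.Set.issubset c d) := by
  induction s with
  | nil => rfl
  | cons d ds ih =>
    simp only [pvStrictSup, List.any_cons]
    split_ifs with h
    · simp [h]
    · simp [h, ih]

theorem pvCollect_eq_filter (order : List (List Int)) (s : List (List Int)) :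
    pvCollect order s = s.filter (fun c => !(pvStrictSup c order)) := by
  induction s with
  | nil => rfl
  | cons c cs ih =>
    by_cases h : pvStrictSup c order = true <;> simp [pvCollect, h, ih]

-- main invariant lemma: folding A's step over the remaining suffix, starting from an
-- accumulator that already "explains" every element of the processed prefix, yields the
-- accumulator followed by the stateless filter of the suffix against the whole list.
theorem pvMain (s : List (List Int))
    (hnd : ∀ c ∈ s, c.Nodup)
    (hpair : s.Pairwise (fun a b => b.length ≤ a.length)) :
    ∀ (rest pre acc : List (List Int)),
      s = pre ++ rest →
      (∀ m ∈ acc, m ∈ s) →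
      (∀ x ∈ pre, x ∈ acc ∨ ∃ m ∈ acc, pvG x m = true) →
      rest.foldl (fun maximal clique =>
          if maximal.any (fun m => pvG clique m) then maximal else maximal ++ [clique]) acc
        = acc ++ rest.filter (fun c => !(s.any (fun d => pvG c d))) := by
  intro rest
  induction rest with
  | nil => intro pre acc _ _ _; simp
  | cons c rest' ih =>
    intro pre acc hsplit hacc hpre
    have hcs : c ∈ s := by rw [hsplit]; simp
    have hcnd : c.Nodup := hnd c hcs
    -- the accumulator test and the whole-list test agree at c
    have hkey : acc.any (fun m => pvG c m) = s.any (fun d => pvG c d) := by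
      rw [Bool.eq_iff_iff]
      simp only [List.any_eq_true]
      constructor
      · rintro ⟨m, hm, hg⟩
        exact ⟨m, hacc m hm, hg⟩
      · rintro ⟨d, hds, hg⟩
        -- d must lie in the processed prefix
        have hdpre : d ∈ pre := by
          rw [hsplit] at hds
          rcases List.mem_append.mp hds with h | h
          · exact h
          · rcases List.mem_cons.mp h with h | h
            · exfalso; rw [h] at hg
              rw [pvG_self c] at hg; exact Bool.false_ne_true hg
            · exfalso
              have hp := hsplit ▸ hpair
              have hcr : (c :: rest').Pairwise (fun a b => b.length ≤ a.length) :=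
                (List.pairwise_append.mp hp).2.1
              have hle : d.length ≤ c.length := (List.pairwise_cons.mp hcr).1 d h
              have := pvG_length_lt hcnd hg
              omega
        rcases hpre d hdpre with hmem | ⟨m, hmacc, hgm⟩
        · exact ⟨d, hmem, hg⟩
        · have hdnd : d.Nodup := by
            apply hnd d; rw [hsplit] at hds ⊢; exact hds
          have hmnd : m.Nodup := hnd m (hacc m hmacc)
          exact ⟨m, hmacc, pvG_trans hcnd hdnd hmnd hg hgm⟩
    cases hA : acc.any (fun m => pvG c m) with
    | true =>
      have hS : s.any (fun d => pvG c d) = true := by rw [← hkey]; exact hA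
      have hm' : ∃ m ∈ acc, pvG c m = true := List.any_eq_true.mp hA
      have step := ih (pre ++ [c]) acc (by rw [hsplit]; simp) hacc (by
        intro x hx
        rcases List.mem_append.mp hx with h | h
        · exact hpre x h
        · rcases List.mem_singleton.mp h with rfl
          exact Or.inr hm')
      simp only [List.foldl_cons, hA, List.filter_cons, hS, Bool.not_true,
        Bool.false_eq_true, if_false, if_true] at step ⊢
      exact step
    | false =>
      have hS : s.any (fun d => pvG c d) = false := by rw [← hkey]; exact hA
      have step := ih (pre ++ [c]) (acc ++ [c]) (by rw [hsplit]; simp)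
        (by intro m hm
            rcases List.mem_append.mp hm with h | h
            · exact hacc m h
            · rcases List.mem_singleton.mp h with rfl; exact hcs)
        (by intro x hx
            rcases List.mem_append.mp hx with h | h
            · rcases hpre x h with h' | ⟨m, hm, hg⟩
              · exact Or.inl (List.mem_append.mpr (Or.inl h'))
              · exact Or.inr ⟨m, List.mem_append.mpr (Or.inl hm), hg⟩
            · rcases List.mem_singleton.mp h with rfl
              exact Or.inl (by simp))
      simp only [List.foldl_cons, hA, List.filter_cons, hS, Bool.not_false,
        Bool.false_eq_true, if_false, if_true] at step ⊢
      rw [step, List.append_assoc]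
      simp

-- ===== VERDICT (by name: the statement is the Claim_ definition above) =====
theorem filter_maximal_py_spec : Claim_equal_filter_maximal_py := by
  intro cliques _ hpre
  unfold Spec_filter_maximal_py filter_maximal_py filter_maximal_py_alt
  by_cases hnil : cliques = []
  · subst hnil; simp [PySem.List.sorted, pvCollect]
  · rw [if_neg hnil]
    simp only [pvG_def]
    set s := PySem.List.sorted cliques (fun c => c.length) true with hs
    have hnd : ∀ c ∈ s, c.Nodup := by
      intro c hc
      exact hpre c ((PySem.List.mem_sorted cliques (fun c => c.length) true c).mp hc)
    have hpair := PySem.List.sorted_pairwise_rev cliques (fun c : List Int => c.length)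
    have hmain := pvMain s hnd hpair s [] [] (by simp) (by simp) (by simp)
    have hfix : pvCollect s s = List.filter (fun c => !(s.any (fun d => pvG c d))) s := by
      rw [pvCollect_eq_filter]
      apply List.filter_congr
      intro c hc
      rw [pvStrictSup_eq_any]
      congr 1
      rw [Bool.eq_iff_iff]
      simp only [List.any_eq_true]
      constructor
      · rintro ⟨d, hd, h⟩
        exact ⟨d, hd, by rw [pvG_eq_strict (hnd c hc) (hnd d hd)]; exact h⟩
      · rintro ⟨d, hd, h⟩
        exact ⟨d, hd, by rw [← pvG_eq_strict (hnd c hc) (hnd d hd)]; exact h⟩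
    rw [hfix]
    simpa using hmain
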